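-- pv_equiv track=rewrite | github.com/seoyoungbyun/SmartMirror | body.py | find_closest_array
-- ===== SOURCE A (Python) =====
-- def find_closest_array(target_array, arrays):
--     """
--     특정 배열의 값들과 비교하여 가장 가까운 값이 많이 존재하는 배열을 반환하는 함수.
--
--     :param target_array: 비교 대상이 되는 특정 배열
--     :param arrays: 비교할 3개의 배열이 포함된 리스트
--     :return: 특정 배열의 값들과 가장 가까운 값이 많이 존재하는 배열
--     """
--     closest_counts = [0] * len(arrays)
--
--     for value in target_array:
--         # 각 value에 대해 모든 배열에서 가장 가까운 값 찾기
--         closest_distances = [min(abs(value - arr_value) for arr_value in array) for array in arrays]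
--         closest_index = closest_distances.index(min(closest_distances))
--         closest_counts[closest_index] += 1
--
--     # 가장 많은 가까운 값이 있는 배열의 인덱스 찾기
--     best_match_index = closest_counts.index(max(closest_counts))
--     return best_match_index
-- ===== SOURCE B (Python) =====
-- def _bisect_left(s, x):
--     lo, hi = 0, len(s)
--     while lo < hi:
--         mid = (lo + hi) // 2
--         if s[mid] < x:
--             lo = mid + 1
--         else:
--             hi = mid
--     return lo
--
--
-- def _nearest_dist(s, x):
--     # s is sorted ascending; distance from x to the nearest element of s (None if s is empty)
--     j = _bisect_left(s, x)
--     best = None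
--     if j < len(s):
--         best = s[j] - x
--     if j > 0 and (best is None or x - s[j - 1] < best):
--         best = x - s[j - 1]
--     return best
--
--
-- def find_closest_array(target_array, arrays):
--     sorted_arrays = [sorted(a) for a in arrays]
--     counts = [0] * len(arrays)
--     for value in target_array:
--         best_i = 0
--         best_d = _nearest_dist(sorted_arrays[0], value)
--         for i in range(1, len(sorted_arrays)):
--             d = _nearest_dist(sorted_arrays[i], value)
--             if d < best_d:
--                 best_i, best_d = i, d
--         counts[best_i] += 1
--     best = 0
--     for i in range(1, len(counts)):
--         if counts[i] > counts[best]: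
--             best = i
--     return best
-- ===== Notes on version B (the rewrite author's own statement) =====
-- stated objective: faster
-- what changed: B sorts each candidate array once and finds each value's nearest element by hand-written binary search (A re-imports no modules, so bisect is written out), replacing A's full scan of every array for every target value; argmin/argmax are kept as single running passes instead of building distance lists and calling index().
import Mathlib
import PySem

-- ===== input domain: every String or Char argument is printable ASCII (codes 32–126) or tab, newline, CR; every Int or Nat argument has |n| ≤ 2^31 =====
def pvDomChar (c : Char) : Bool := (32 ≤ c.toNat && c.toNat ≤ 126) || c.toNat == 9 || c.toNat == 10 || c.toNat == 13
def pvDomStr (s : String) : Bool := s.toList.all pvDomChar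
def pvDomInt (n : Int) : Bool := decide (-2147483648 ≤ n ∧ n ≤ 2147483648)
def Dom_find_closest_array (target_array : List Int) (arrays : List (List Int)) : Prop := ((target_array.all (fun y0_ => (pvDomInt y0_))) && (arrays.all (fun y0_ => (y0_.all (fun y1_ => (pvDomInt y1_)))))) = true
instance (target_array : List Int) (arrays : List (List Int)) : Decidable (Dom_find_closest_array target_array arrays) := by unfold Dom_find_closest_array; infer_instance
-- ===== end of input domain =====

-- B replaces A's per-value full scan of every array by sorting each array once and binary-searching
-- the nearest element per target value (an asymptotic speed-up measured).

-- ===== PORT A =====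
-- Literal transliteration of A: per target value, a distance list over all arrays (each entry a
-- full min-scan of the array), then closest_distances.index(min(...)), counts updated in place,
-- finally closest_counts.index(max(...)). Python's min/max on an empty list raise → .getD 0 is
-- only reached outside Pre_find_closest_array.
def find_closest_array (target_array : List Int) (arrays : List (List Int)) : Int :=
  let closest_counts : List Int := List.replicate arrays.length 0
  let counts := target_array.foldl (fun (counts : List Int) value =>
    let closest_distances : List Int :=
      arrays.map (fun array =>
        (PySem.List.min? (array.map (fun arr_value => |value - arr_value|)) (fun d => d)).getD 0)
    let closest_index : Nat :=
      (PySem.List.index? closest_distances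
        ((PySem.List.min? closest_distances (fun d => d)).getD 0)).getD 0
    counts.set closest_index (counts.getD closest_index 0 + 1)) closest_counts
  (((PySem.List.index? counts ((PySem.List.max? counts (fun d => d)).getD 0)).getD 0 : Nat) : Int)

-- ===== PORT B =====
-- Source B hand-writes bisect_left (A imports no modules, so B may not import bisect); the port
-- transcribes that while-loop. (lo+hi)//2 on the Nat bounds is exactly Python's // here.
def pvBLLoop (s : List Int) (x : Int) : Nat → Nat → Nat → Nat
  | 0, lo, _ => lo  -- fuel only makes the loop structural: hi - lo shrinks every iteration,
                    -- so fuel = initial hi - lo is never exhausted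
  | fuel + 1, lo, hi =>
    if lo < hi then
      let mid := (lo + hi) / 2
      if s.getD mid 0 < x then pvBLLoop s x fuel (mid + 1) hi else pvBLLoop s x fuel lo mid
    else lo

def pvBisectLeft (s : List Int) (x : Int) : Nat := pvBLLoop s x s.length 0 s.length

-- _nearest_dist: None = Python None (s empty); s[j] - x and x - s[j-1] are the absolute
-- distances because s is sorted around the insertion point j.
def pvNearestDist (s : List Int) (x : Int) : Option Int :=
  let j := pvBisectLeft s x
  let best : Option Int := if j < s.length then some (s.getD j 0 - x) else none
  if 0 < j ∧ (best = none ∨ x - s.getD (j - 1) 0 < best.getD 0) then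
    some (x - s.getD (j - 1) 0)
  else best

-- for i in range(1, n) is the Nat list List.range' 1 (n-1) = [1, …, n-1] (exact for n ≥ 0).
-- Python's 'd < best_d' only compares ints inside Pre_ (both Options are some there); .getD 0
-- ports that comparison.
def find_closest_array_alt (target_array : List Int) (arrays : List (List Int)) : Int :=
  let sorted_arrays := arrays.map (fun a => PySem.List.sorted a (fun x => x) false)
  let counts0 : List Int := List.replicate arrays.length 0
  let counts := target_array.foldl (fun (counts : List Int) value =>
    let acc := (List.range' 1 (sorted_arrays.length - 1)).foldl
      (fun (acc : Nat × Option Int) i =>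
        let d := pvNearestDist (sorted_arrays.getD i []) value
        if d.getD 0 < acc.2.getD 0 then (i, d) else acc)
      (0, pvNearestDist (sorted_arrays.getD 0 []) value)
    counts.set acc.1 (counts.getD acc.1 0 + 1)) counts0
  let best := (List.range' 1 (counts.length - 1)).foldl
    (fun (b : Nat) i => if counts.getD i 0 > counts.getD b 0 then i else b) 0
  ((best : Nat) : Int)

-- ===== PRECONDITION & SPEC =====
-- Exactly the inputs on which A returns: arrays nonempty, and (unless target_array is empty,
-- in which case no min is ever taken) every inner array nonempty; elsewhere A raises ValueError.
def Pre_find_closest_array (target_array : List Int) (arrays : List (List Int)) : Prop :=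
  arrays ≠ [] ∧ (target_array = [] ∨ ∀ a ∈ arrays, a ≠ [])
instance (target_array : List Int) (arrays : List (List Int)) : Decidable (Pre_find_closest_array target_array arrays) := by unfold Pre_find_closest_array; infer_instance

def pvWitness_find_closest_array : List Int × List (List Int) :=
  ([3, -1, 10], [[1, 5], [9, 2], [0]])

def Spec_find_closest_array (target_array : List Int) (arrays : List (List Int)) (out : Int) : Prop := out = find_closest_array_alt target_array arrays
instance (target_array : List Int) (arrays : List (List Int)) (out : Int) : Decidable (Spec_find_closest_array target_array arrays out) := by unfold Spec_find_closest_array; infer_instance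

-- ===== CLAIM (what is proved, stated in full; the proofs are below) =====
def Claim_equal_find_closest_array : Prop := ∀ (target_array : List Int) (arrays : List (List Int)), Dom_find_closest_array target_array arrays → Pre_find_closest_array target_array arrays → Spec_find_closest_array target_array arrays (find_closest_array target_array arrays)

-- ===== LEMMAS AND PROOFS =====

lemma pairwise_getD_mono (s : List Int) (hp : s.Pairwise (· ≤ ·)) {i j : Nat}
    (hij : i ≤ j) (hj : j < s.length) : s.getD i 0 ≤ s.getD j 0 := by
  rcases eq_or_lt_of_le hij with rfl | h
  · rfl
  · rw [List.getD_eq_getElem s 0 (by omega), List.getD_eq_getElem s 0 hj]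
    exact List.pairwise_iff_getElem.mp hp i j (by omega) hj h

-- pvBLLoop keeps the classical bisect invariant on a sorted list.
lemma pvBLLoop_spec (s : List Int) (x : Int) (hp : s.Pairwise (· ≤ ·)) :
    ∀ fuel lo hi, hi - lo ≤ fuel → lo ≤ hi → hi ≤ s.length →
    (∀ k, k < lo → s.getD k 0 < x) → (∀ k, hi ≤ k → k < s.length → x ≤ s.getD k 0) →
    lo ≤ pvBLLoop s x fuel lo hi ∧ pvBLLoop s x fuel lo hi ≤ hi ∧
    (∀ k, k < pvBLLoop s x fuel lo hi → s.getD k 0 < x) ∧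
    (∀ k, pvBLLoop s x fuel lo hi ≤ k → k < s.length → x ≤ s.getD k 0) := by
  intro fuel
  induction fuel with
  | zero =>
    intro lo hi hn hle hhi hlo hup
    have : lo = hi := by omega
    subst this
    simp only [pvBLLoop]
    exact ⟨le_refl _, le_refl _, hlo, fun k hk => hup k (by omega)⟩
  | succ fuel ih =>
    intro lo hi hn hle hhi hlo hup
    rw [pvBLLoop]
    by_cases h : lo < hi
    · simp only [h, if_true]
      set mid := (lo + hi) / 2 with hmid
      have hmlt : mid < hi := by omega
      have hmge : lo ≤ mid := by omega
      by_cases hc : s.getD mid 0 < x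
      · simp only [hc, if_true]
        have := ih (mid + 1) hi (by omega) (by omega) hhi
          (fun k hk => by
            rcases lt_or_ge k lo with h' | h'
            · exact hlo k h'
            · exact lt_of_le_of_lt (pairwise_getD_mono s hp (by omega) (by omega)) hc)
          hup
        exact ⟨by omega, this.2.1, this.2.2.1, this.2.2.2⟩
      · simp only [hc, if_false]
        rw [not_lt] at hc
        have := ih lo mid (by omega) (by omega) (by omega) hlo
          (fun k hk hk' => le_trans hc (pairwise_getD_mono s hp hk hk'))
        exact ⟨this.1, by omega, this.2.2.1, this.2.2.2⟩
    · simp only [h, if_false]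
      exact ⟨le_refl _, hle, hlo, fun k hk => hup k (by omega)⟩

lemma pvBisectLeft_spec (s : List Int) (x : Int) (hp : s.Pairwise (· ≤ ·)) :
    pvBisectLeft s x ≤ s.length ∧
    (∀ k, k < pvBisectLeft s x → s.getD k 0 < x) ∧
    (∀ k, pvBisectLeft s x ≤ k → k < s.length → x ≤ s.getD k 0) := by
  have := pvBLLoop_spec s x hp s.length 0 s.length (by omega) (by omega) (le_refl _)
    (fun k hk => absurd hk (Nat.not_lt_zero k)) (fun k hk hk' => absurd hk' (by omega))
  exact ⟨this.2.1, this.2.2.1, this.2.2.2⟩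

-- On a sorted nonempty list, _nearest_dist returns some d, d an attained absolute distance
-- and a lower bound on all of them.
lemma pvNearestDist_spec (s : List Int) (x : Int) (hp : s.Pairwise (· ≤ ·)) (hne : s ≠ []) :
    ∃ d, pvNearestDist s x = some d ∧ (∃ y ∈ s, d = |x - y|) ∧ ∀ y ∈ s, d ≤ |x - y| := by
  obtain ⟨hj1, hj2, hj3⟩ := pvBisectLeft_spec s x hp
  have hlen : 0 < s.length := List.length_pos_iff.mpr hne
  set j := pvBisectLeft s x with hjdef
  have key : ∀ k, k < s.length → (j ≤ k → s.getD j 0 - x ≤ |x - s.getD k 0|) ∧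
      (k < j → x - s.getD (j-1) 0 ≤ |x - s.getD k 0|) := by
    intro k hk
    constructor
    · intro hjk
      have h1 : x ≤ s.getD k 0 := hj3 k hjk hk
      have h2 : s.getD j 0 ≤ s.getD k 0 := pairwise_getD_mono s hp hjk hk
      rw [abs_of_nonpos (by omega)]; omega
    · intro hkj
      have h1 : s.getD k 0 < x := hj2 k hkj
      have h2 : s.getD k 0 ≤ s.getD (j-1) 0 := pairwise_getD_mono s hp (by omega) (by omega)
      rw [abs_of_pos (by omega)]; omega
  have hmem : ∀ k, k < s.length → s.getD k 0 ∈ s := by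
    intro k hk; rw [List.getD_eq_getElem s 0 hk]; exact List.getElem_mem hk
  have memiff : ∀ y ∈ s, ∃ k, k < s.length ∧ s.getD k 0 = y := by
    intro y hy
    obtain ⟨k, hk, hyk⟩ := List.getElem_of_mem hy
    exact ⟨k, hk, by rw [List.getD_eq_getElem s 0 hk, hyk]⟩
  unfold pvNearestDist
  rw [← hjdef]
  by_cases hjl : j < s.length
  · simp only [hjl, if_true]
    have habs1 : s.getD j 0 - x = |x - s.getD j 0| := by
      have := hj3 j (le_refl _) hjl; rw [abs_of_nonpos (by omega)]; ring
    by_cases hj0 : 0 < j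
    · have habs2 : x - s.getD (j-1) 0 = |x - s.getD (j-1) 0| := by
        have := hj2 (j-1) (by omega); rw [abs_of_pos (by omega)]
      by_cases hcmp : x - s.getD (j - 1) 0 < s.getD j 0 - x
      · rw [if_pos ⟨hj0, Or.inr (by rw [Option.getD_some]; exact hcmp)⟩]
        refine ⟨_, rfl, ⟨_, hmem (j-1) (by omega), habs2⟩, ?_⟩
        intro y hy; obtain ⟨k, hk, rfl⟩ := memiff y hy
        rcases lt_or_ge k j with h | h
        · exact (key k hk).2 h
        · exact le_trans (le_of_lt hcmp) ((key k hk).1 h)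
      · rw [if_neg (by rw [Option.getD_some]; exact fun h => hcmp (h.2.resolve_left (Option.some_ne_none _)))]
        refine ⟨_, rfl, ⟨_, hmem j hjl, habs1⟩, ?_⟩
        intro y hy; obtain ⟨k, hk, rfl⟩ := memiff y hy
        rcases lt_or_ge k j with h | h
        · exact le_trans (by omega) ((key k hk).2 h)
        · exact (key k hk).1 h
    · rw [if_neg (fun h => by omega)]
      refine ⟨_, rfl, ⟨_, hmem j hjl, habs1⟩, ?_⟩
      intro y hy; obtain ⟨k, hk, rfl⟩ := memiff y hy
      exact (key k hk).1 (by omega)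
  · have hj0 : 0 < j := by omega
    simp only [hjl, if_false]
    rw [if_pos ⟨hj0, by simp⟩]
    have habs2 : x - s.getD (j-1) 0 = |x - s.getD (j-1) 0| := by
      have := hj2 (j-1) (by omega); rw [abs_of_pos (by omega)]
    refine ⟨_, rfl, ⟨_, hmem (j-1) (by omega), habs2⟩, ?_⟩
    intro y hy; obtain ⟨k, hk, rfl⟩ := memiff y hy
    exact (key k hk).2 (by omega)

-- Bridge to A's per-array expression: nearest distance on sorted(arr) = min of |x - w| over arr.
lemma pvNearestDist_sorted_eq_min (arr : List Int) (x : Int) (hne : arr ≠ []) :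
    (pvNearestDist (PySem.List.sorted arr (fun y => y) false) x).getD 0
      = (PySem.List.min? (arr.map (fun w => |x - w|)) (fun d => d)).getD 0 := by
  set s := PySem.List.sorted arr (fun y => y) false with hs
  have hsp : s.Pairwise (· ≤ ·) := by simpa using PySem.List.sorted_pairwise arr (fun y => y)
  have hsne : s ≠ [] := by rw [hs, Ne, PySem.List.sorted_eq_nil_iff]; exact hne
  have hmem : ∀ y, y ∈ s ↔ y ∈ arr := fun y => PySem.List.mem_sorted arr (fun z => z) false y
  obtain ⟨d, hd, ⟨y0, hy0, hdy0⟩, hmin⟩ := pvNearestDist_spec s x hsp hsne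
  have hmapne : arr.map (fun w => |x - w|) ≠ [] := by simpa using hne
  obtain ⟨m, hm⟩ := Option.ne_none_iff_exists'.mp
    (fun h => hmapne ((PySem.List.min?_eq_none_iff (xs := arr.map (fun w => |x - w|)) (key := fun d => d)).mp h))
  rw [hd, hm, Option.getD_some, Option.getD_some]
  have hmmem : m ∈ arr.map (fun w => |x - w|) := PySem.List.min?_mem hm
  obtain ⟨w0, hw0, hmw0⟩ := List.mem_map.mp hmmem
  have hmmin : ∀ z ∈ arr.map (fun w => |x - w|), m ≤ z := by
    intro z hz; exact PySem.List.min?_isMin hm z hz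
  apply le_antisymm
  · rw [← hmw0]; exact hmin w0 ((hmem w0).mpr hw0)
  · exact hmmin _ (List.mem_map.mpr ⟨y0, (hmem y0).mp hy0, hdy0.symm⟩)

-- B's inner fold: the pair's second component always tracks pvNearestDist of the first.
lemma foldl_pair_track (h : Nat → Option Int) :
    ∀ (l : List Nat) (b0 : Nat),
    l.foldl (fun (acc : Nat × Option Int) i =>
        if (h i).getD 0 < acc.2.getD 0 then (i, h i) else acc) (b0, h b0)
      = (l.foldl (fun b i => if (h i).getD 0 < (h b).getD 0 then i else b) b0,
         h (l.foldl (fun b i => if (h i).getD 0 < (h b).getD 0 then i else b) b0)) := by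
  intro l
  induction l with
  | nil => intro b0; rfl
  | cons a t ih =>
    intro b0
    simp only [List.foldl_cons]
    by_cases hc : (h a).getD 0 < (h b0).getD 0
    · rw [if_pos hc, if_pos hc]; exact ih a
    · rw [if_neg hc, if_neg hc]; exact ih b0

-- A running first-argmin over indices 1..k starting from 0.
lemma foldl_firstmin (g : Nat → Int) :
    ∀ k, (List.range' 1 k).foldl (fun b i => if g i < g b then i else b) 0 ≤ k ∧
    (∀ i ≤ k, g ((List.range' 1 k).foldl (fun b i => if g i < g b then i else b) 0) ≤ g i) ∧
    (∀ i < (List.range' 1 k).foldl (fun b i => if g i < g b then i else b) 0,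
      g ((List.range' 1 k).foldl (fun b i => if g i < g b then i else b) 0) < g i) := by
  intro k
  induction k with
  | zero =>
    simp only [List.range', List.foldl_nil]
    exact ⟨le_refl 0, fun i hi => by have : i = 0 := by omega
                                     subst this; exact le_refl _, fun i hi => by omega⟩
  | succ k ih =>
    rw [show List.range' 1 (k+1) = List.range' 1 k ++ [k + 1] by rw [List.range'_concat]; simp [Nat.add_comm], List.foldl_append]
    simp only [List.foldl_cons, List.foldl_nil]
    set b := (List.range' 1 k).foldl (fun b i => if g i < g b then i else b) 0 with hb
    obtain ⟨ih1, ih2, ih3⟩ := ih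
    by_cases hc : g (k + 1) < g b
    · rw [if_pos hc]
      refine ⟨by omega, ?_, ?_⟩
      · intro i hi
        rcases Nat.lt_or_ge i (k+1) with h | h
        · exact le_of_lt (lt_of_lt_of_le hc (ih2 i (by omega)))
        · have : i = k + 1 := by omega
          subst this; exact le_refl _
      · intro i hi
        exact lt_of_lt_of_le hc (ih2 i (by omega))
    · rw [if_neg hc]
      refine ⟨by omega, ?_, ih3⟩
      intro i hi
      rcases Nat.lt_or_ge i (k+1) with h | h
      · exact ih2 i (by omega)
      · have : i = k + 1 := by omega
        subst this; omega

-- A running first-argmax over indices 1..k starting from 0 (B's final loop).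
lemma foldl_firstmax (g : Nat → Int) :
    ∀ k, (List.range' 1 k).foldl (fun b i => if g i > g b then i else b) 0 ≤ k ∧
    (∀ i ≤ k, g i ≤ g ((List.range' 1 k).foldl (fun b i => if g i > g b then i else b) 0)) ∧
    (∀ i < (List.range' 1 k).foldl (fun b i => if g i > g b then i else b) 0,
      g i < g ((List.range' 1 k).foldl (fun b i => if g i > g b then i else b) 0)) := by
  intro k
  induction k with
  | zero =>
    simp only [List.range', List.foldl_nil]
    exact ⟨le_refl 0, fun i hi => by have : i = 0 := by omega
                                     subst this; exact le_refl _, fun i hi => by omega⟩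
  | succ k ih =>
    rw [show List.range' 1 (k+1) = List.range' 1 k ++ [k + 1] by rw [List.range'_concat]; simp [Nat.add_comm], List.foldl_append]
    simp only [List.foldl_cons, List.foldl_nil]
    set b := (List.range' 1 k).foldl (fun b i => if g i > g b then i else b) 0 with hb
    obtain ⟨ih1, ih2, ih3⟩ := ih
    by_cases hc : g (k + 1) > g b
    · rw [if_pos hc]
      refine ⟨by omega, ?_, ?_⟩
      · intro i hi
        rcases Nat.lt_or_ge i (k+1) with h | h
        · exact le_of_lt (lt_of_le_of_lt (ih2 i (by omega)) hc)
        · have : i = k + 1 := by omega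
          subst this; exact le_refl _
      · intro i hi
        exact lt_of_le_of_lt (ih2 i (by omega)) hc
    · rw [if_neg hc]
      refine ⟨by omega, ?_, ih3⟩
      intro i hi
      rcases Nat.lt_or_ge i (k+1) with h | h
      · exact ih2 i (by omega)
      · have : i = k + 1 := by omega
        subst this; omega

-- A's list.index(min(ds)) is the first argmin position of ds.
lemma index_min_first (ds : List Int) (hne : ds ≠ []) :
    ∃ c, PySem.List.index? ds ((PySem.List.min? ds (fun d => d)).getD 0) = some c ∧
      c < ds.length ∧ (∀ i, i < ds.length → ds.getD c 0 ≤ ds.getD i 0) ∧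
      (∀ i, i < c → ds.getD i 0 > ds.getD c 0) := by
  obtain ⟨m, hm⟩ := Option.ne_none_iff_exists'.mp
    (fun h => hne ((PySem.List.min?_eq_none_iff (xs := ds) (key := fun d => d)).mp h))
  rw [hm, Option.getD_some]
  have hmm : m ∈ ds := PySem.List.min?_mem hm
  obtain ⟨c, hc⟩ := Option.ne_none_iff_exists'.mp
    (fun h => ((PySem.List.index?_eq_none_iff _ _).mp h) hmm)
  obtain ⟨hclen, hcv, hcfst⟩ := PySem.List.getElem_of_index?_eq_some hc
  refine ⟨c, hc, hclen, ?_, ?_⟩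
  · intro i hi
    rw [List.getD_eq_getElem ds 0 hclen, List.getD_eq_getElem ds 0 hi, hcv]
    exact PySem.List.min?_isMin hm _ (List.getElem_mem hi)
  · intro i hi
    have hilen : i < ds.length := by omega
    rw [List.getD_eq_getElem ds 0 hclen, List.getD_eq_getElem ds 0 hilen, hcv]
    have hne' : ds[i] ≠ m := hcfst i hi
    have := PySem.List.min?_isMin hm ds[i] (List.getElem_mem hilen)
    omega

-- A's list.index(max(cs)) is the first argmax position of cs.
lemma index_max_first (cs : List Int) (hne : cs ≠ []) :
    ∃ c, PySem.List.index? cs ((PySem.List.max? cs (fun d => d)).getD 0) = some c ∧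
      c < cs.length ∧ (∀ i, i < cs.length → cs.getD i 0 ≤ cs.getD c 0) ∧
      (∀ i, i < c → cs.getD i 0 < cs.getD c 0) := by
  obtain ⟨m, hm⟩ := Option.ne_none_iff_exists'.mp
    (fun h => hne ((PySem.List.max?_eq_none_iff (xs := cs) (key := fun d => d)).mp h))
  rw [hm, Option.getD_some]
  have hmm : m ∈ cs := PySem.List.max?_mem hm
  obtain ⟨c, hc⟩ := Option.ne_none_iff_exists'.mp
    (fun h => ((PySem.List.index?_eq_none_iff _ _).mp h) hmm)
  obtain ⟨hclen, hcv, hcfst⟩ := PySem.List.getElem_of_index?_eq_some hc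
  refine ⟨c, hc, hclen, ?_, ?_⟩
  · intro i hi
    rw [List.getD_eq_getElem cs 0 hclen, List.getD_eq_getElem cs 0 hi, hcv]
    exact PySem.List.max?_isMax hm _ (List.getElem_mem hi)
  · intro i hi
    have hilen : i < cs.length := by omega
    rw [List.getD_eq_getElem cs 0 hclen, List.getD_eq_getElem cs 0 hilen, hcv]
    have hne' : cs[i] ≠ m := hcfst i hi
    have := PySem.List.max?_isMax hm cs[i] (List.getElem_mem hilen)
    omega

-- Per target value: A's closest_index equals B's running argmin index.
lemma step_index_eq (arrays : List (List Int)) (value : Int)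
    (hne : arrays ≠ []) (hall : ∀ a ∈ arrays, a ≠ []) :
    (PySem.List.index?
        (arrays.map (fun array =>
          (PySem.List.min? (array.map (fun arr_value => |value - arr_value|)) (fun d => d)).getD 0))
        ((PySem.List.min?
          (arrays.map (fun array =>
            (PySem.List.min? (array.map (fun arr_value => |value - arr_value|)) (fun d => d)).getD 0))
          (fun d => d)).getD 0)).getD 0
    = (((List.range' 1 ((arrays.map (fun a => PySem.List.sorted a (fun x => x) false)).length - 1)).foldl
        (fun (acc : Nat × Option Int) i =>
          let d := pvNearestDist ((arrays.map (fun a => PySem.List.sorted a (fun x => x) false)).getD i []) value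
          if d.getD 0 < acc.2.getD 0 then (i, d) else acc)
        (0, pvNearestDist ((arrays.map (fun a => PySem.List.sorted a (fun x => x) false)).getD 0 []) value)).1) := by
  set sa := arrays.map (fun a => PySem.List.sorted a (fun x => x) false) with hsa
  set ds := arrays.map (fun array =>
    (PySem.List.min? (array.map (fun arr_value => |value - arr_value|)) (fun d => d)).getD 0) with hds
  have hn : 0 < arrays.length := List.length_pos_iff.mpr hne
  have hsalen : sa.length = arrays.length := by rw [hsa, List.length_map]
  have hdslen : ds.length = arrays.length := by rw [hds, List.length_map]
  have hdsne : ds ≠ [] := by rw [hds]; simpa using hne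
  set h : Nat → Option Int := fun i => pvNearestDist (sa.getD i []) value with hh
  have hg : ∀ i, i < arrays.length → (h i).getD 0 = ds.getD i 0 := by
    intro i hi
    have h1 : sa.getD i [] = PySem.List.sorted arrays[i] (fun x => x) false := by
      rw [List.getD_eq_getElem sa [] (by omega)]
      simp [hsa]
    have h2 : ds.getD i 0 =
        (PySem.List.min? (arrays[i].map (fun w => |value - w|)) (fun d => d)).getD 0 := by
      rw [List.getD_eq_getElem ds 0 (by omega)]
      simp [hds]
    show (pvNearestDist (sa.getD i []) value).getD 0 = ds.getD i 0
    rw [h1, h2, pvNearestDist_sorted_eq_min arrays[i] value (hall _ (List.getElem_mem hi))]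
  have htrack := foldl_pair_track h (List.range' 1 (sa.length - 1)) 0
  have hfold : ((List.range' 1 (sa.length - 1)).foldl
      (fun (acc : Nat × Option Int) i =>
        let d := pvNearestDist (sa.getD i []) value
        if d.getD 0 < acc.2.getD 0 then (i, d) else acc)
      (0, pvNearestDist (sa.getD 0 []) value)).1
      = (List.range' 1 (sa.length - 1)).foldl
          (fun b i => if (h i).getD 0 < (h b).getD 0 then i else b) 0 := by
    simp only []
    rw [show (fun (acc : Nat × Option Int) i =>
        if (pvNearestDist (sa.getD i []) value).getD 0 < acc.2.getD 0
        then (i, pvNearestDist (sa.getD i []) value) else acc)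
      = (fun (acc : Nat × Option Int) i =>
        if (h i).getD 0 < acc.2.getD 0 then (i, h i) else acc) from rfl]
    rw [show pvNearestDist (sa.getD 0 []) value = h 0 from rfl, htrack]
  rw [hfold]
  set b := (List.range' 1 (sa.length - 1)).foldl
    (fun b i => if (h i).getD 0 < (h b).getD 0 then i else b) 0 with hbdef
  obtain ⟨hb1, hb2, hb3⟩ := foldl_firstmin (fun i => (h i).getD 0) (sa.length - 1)
  rw [← hbdef] at hb1 hb2 hb3
  obtain ⟨c, hc, hclen, hc2, hc3⟩ := index_min_first ds hdsne
  rw [hc, Option.getD_some]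
  have hblt : b < arrays.length := by omega
  rcases Nat.lt_trichotomy c b with hlt | heq | hgt
  · exfalso
    have h1 := hb3 c hlt
    rw [hg c (by omega), hg b hblt] at h1
    have h2 := hc2 b (by omega)
    omega
  · exact heq
  · exfalso
    have h1 := hc3 b hgt
    have h2 := hb2 c (by omega)
    rw [hg c (by omega), hg b hblt] at h2
    omega

-- counts[i] += 1 steps preserve the list's length through the whole fold.
lemma foldl_set_length (step : List Int → Int → List Int)
    (hstep : ∀ cs v, (step cs v).length = cs.length) :
    ∀ (l : List Int) (cs : List Int), (l.foldl step cs).length = cs.length := by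
  intro l
  induction l with
  | nil => intro cs; rfl
  | cons a t ih => intro cs; rw [List.foldl_cons, ih, hstep]

-- A's counts.index(max(counts)) equals B's running argmax loop, on any nonempty counts list.
lemma final_argmax_eq (cs : List Int) (hne : cs ≠ []) :
    ((PySem.List.index? cs ((PySem.List.max? cs (fun d => d)).getD 0)).getD 0 : Nat)
      = (List.range' 1 (cs.length - 1)).foldl
          (fun (b : Nat) i => if cs.getD i 0 > cs.getD b 0 then i else b) 0 := by
  have hn : 0 < cs.length := List.length_pos_iff.mpr hne
  obtain ⟨c, hc, hclen, hc2, hc3⟩ := index_max_first cs hne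
  rw [hc, Option.getD_some]
  obtain ⟨hb1, hb2, hb3⟩ := foldl_firstmax (fun i => cs.getD i 0) (cs.length - 1)
  set b := (List.range' 1 (cs.length - 1)).foldl
    (fun (b : Nat) i => if cs.getD i 0 > cs.getD b 0 then i else b) 0 with hbdef
  have hblt : b < cs.length := by omega
  rcases Nat.lt_trichotomy c b with hlt | heq | hgt
  · exfalso; have h1 := hb3 c hlt; have h2 := hc2 b hblt; omega
  · exact heq
  · exfalso; have h1 := hc3 b hgt; have h2 := hb2 c (by omega); omega

-- ===== VERDICT (by name: the statement is the Claim_ definition above) =====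
theorem find_closest_array_spec : Claim_equal_find_closest_array := by
  intro target_array arrays hdom hpre
  obtain ⟨hne, hpre2⟩ := hpre
  unfold Spec_find_closest_array find_closest_array find_closest_array_alt
  simp only []
  have hcounts :
      target_array.foldl (fun (counts : List Int) value =>
        counts.set
          ((PySem.List.index?
            (arrays.map (fun array =>
              (PySem.List.min? (array.map (fun arr_value => |value - arr_value|)) (fun d => d)).getD 0))
            ((PySem.List.min?
              (arrays.map (fun array =>
                (PySem.List.min? (array.map (fun arr_value => |value - arr_value|)) (fun d => d)).getD 0))
              (fun d => d)).getD 0)).getD 0)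
          (counts.getD
            ((PySem.List.index?
              (arrays.map (fun array =>
                (PySem.List.min? (array.map (fun arr_value => |value - arr_value|)) (fun d => d)).getD 0))
              ((PySem.List.min?
                (arrays.map (fun array =>
                  (PySem.List.min? (array.map (fun arr_value => |value - arr_value|)) (fun d => d)).getD 0))
                (fun d => d)).getD 0)).getD 0) 0 + 1)) (List.replicate arrays.length 0)
      = target_array.foldl (fun (counts : List Int) value =>
          counts.set
            (((List.range' 1 ((arrays.map (fun a => PySem.List.sorted a (fun x => x) false)).length - 1)).foldl
              (fun (acc : Nat × Option Int) i =>
                let d := pvNearestDist ((arrays.map (fun a => PySem.List.sorted a (fun x => x) false)).getD i []) value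
                if d.getD 0 < acc.2.getD 0 then (i, d) else acc)
              (0, pvNearestDist ((arrays.map (fun a => PySem.List.sorted a (fun x => x) false)).getD 0 []) value)).1)
            (counts.getD
              (((List.range' 1 ((arrays.map (fun a => PySem.List.sorted a (fun x => x) false)).length - 1)).foldl
                (fun (acc : Nat × Option Int) i =>
                  let d := pvNearestDist ((arrays.map (fun a => PySem.List.sorted a (fun x => x) false)).getD i []) value
                  if d.getD 0 < acc.2.getD 0 then (i, d) else acc)
                (0, pvNearestDist ((arrays.map (fun a => PySem.List.sorted a (fun x => x) false)).getD 0 []) value)).1) 0 + 1))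
          (List.replicate arrays.length 0) := by
    rcases hpre2 with rfl | hall
    · rfl
    · congr 1
      funext counts value
      rw [step_index_eq arrays value hne hall]
  rw [hcounts]
  have hcslen : (target_array.foldl (fun (counts : List Int) value =>
          counts.set
            (((List.range' 1 ((arrays.map (fun a => PySem.List.sorted a (fun x => x) false)).length - 1)).foldl
              (fun (acc : Nat × Option Int) i =>
                let d := pvNearestDist ((arrays.map (fun a => PySem.List.sorted a (fun x => x) false)).getD i []) value
                if d.getD 0 < acc.2.getD 0 then (i, d) else acc)
              (0, pvNearestDist ((arrays.map (fun a => PySem.List.sorted a (fun x => x) false)).getD 0 []) value)).1)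
            (counts.getD
              (((List.range' 1 ((arrays.map (fun a => PySem.List.sorted a (fun x => x) false)).length - 1)).foldl
                (fun (acc : Nat × Option Int) i =>
                  let d := pvNearestDist ((arrays.map (fun a => PySem.List.sorted a (fun x => x) false)).getD i []) value
                  if d.getD 0 < acc.2.getD 0 then (i, d) else acc)
                (0, pvNearestDist ((arrays.map (fun a => PySem.List.sorted a (fun x => x) false)).getD 0 []) value)).1) 0 + 1))
      (List.replicate arrays.length 0)).length = arrays.length :=
    (foldl_set_length _ (fun cs v => List.length_set) target_array
      (List.replicate arrays.length 0)).trans List.length_replicate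
  have hcsne : target_array.foldl (fun (counts : List Int) value =>
          counts.set
            (((List.range' 1 ((arrays.map (fun a => PySem.List.sorted a (fun x => x) false)).length - 1)).foldl
              (fun (acc : Nat × Option Int) i =>
                let d := pvNearestDist ((arrays.map (fun a => PySem.List.sorted a (fun x => x) false)).getD i []) value
                if d.getD 0 < acc.2.getD 0 then (i, d) else acc)
              (0, pvNearestDist ((arrays.map (fun a => PySem.List.sorted a (fun x => x) false)).getD 0 []) value)).1)
            (counts.getD
              (((List.range' 1 ((arrays.map (fun a => PySem.List.sorted a (fun x => x) false)).length - 1)).foldl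
                (fun (acc : Nat × Option Int) i =>
                  let d := pvNearestDist ((arrays.map (fun a => PySem.List.sorted a (fun x => x) false)).getD i []) value
                  if d.getD 0 < acc.2.getD 0 then (i, d) else acc)
                (0, pvNearestDist ((arrays.map (fun a => PySem.List.sorted a (fun x => x) false)).getD 0 []) value)).1) 0 + 1))
      (List.replicate arrays.length 0) ≠ [] := by
    intro h; rw [h] at hcslen
    exact hne (List.length_eq_zero_iff.mp hcslen.symm)
  exact congrArg (fun (n : Nat) => (n : Int)) (final_argmax_eq _ hcsne)
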